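-- pv_equiv track=rewrite | github.com/CottageLabs/journalcheckertool | Importer/jctdata/jac.py | _extract_preferred
-- ===== SOURCE A (Python) =====
-- def _extract_preferred(title_source_pairs, preference_order):
--     selected = None
--     idx = -1
--     for pref in preference_order:
--         for i, tup in enumerate(title_source_pairs):
--             source, title = tup
--             if pref == source:
--                 selected = title
--                 idx = i
--                 break
--
--     if selected is None:
--         selected = title_source_pairs[0][0]
--         idx = 0
--
--     del title_source_pairs[idx]
--     return selected
-- ===== SOURCE B (Python) =====
-- def _extract_preferred(title_source_pairs, preference_order):
--     # Index each source by its FIRST occurrence in one pass, then walk the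
--     # preference order BACKWARDS and stop at the first preference that is
--     # indexed (which is exactly the last one present).  Mutates
--     # title_source_pairs (deletes the chosen pair) like the original.
--     first = {}
--     for i, (source, title) in enumerate(title_source_pairs):
--         first.setdefault(source, (i, title))
--     for pref in reversed(preference_order):
--         if pref in first:
--             idx, selected = first[pref]
--             break
--     else:
--         selected = title_source_pairs[0][0]
--         idx = 0
--     del title_source_pairs[idx]
--     return selected
-- ===== Notes on version B (the rewrite author's own statement) =====
-- stated objective: faster
-- what changed: Instead of A's nested overwrite loop (a full scan of the pairs for every preference, last match winning), B builds a first-occurrence index of the pairs once and then walks the preference order in reverse with an early break at the first indexed preference.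
import Mathlib
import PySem

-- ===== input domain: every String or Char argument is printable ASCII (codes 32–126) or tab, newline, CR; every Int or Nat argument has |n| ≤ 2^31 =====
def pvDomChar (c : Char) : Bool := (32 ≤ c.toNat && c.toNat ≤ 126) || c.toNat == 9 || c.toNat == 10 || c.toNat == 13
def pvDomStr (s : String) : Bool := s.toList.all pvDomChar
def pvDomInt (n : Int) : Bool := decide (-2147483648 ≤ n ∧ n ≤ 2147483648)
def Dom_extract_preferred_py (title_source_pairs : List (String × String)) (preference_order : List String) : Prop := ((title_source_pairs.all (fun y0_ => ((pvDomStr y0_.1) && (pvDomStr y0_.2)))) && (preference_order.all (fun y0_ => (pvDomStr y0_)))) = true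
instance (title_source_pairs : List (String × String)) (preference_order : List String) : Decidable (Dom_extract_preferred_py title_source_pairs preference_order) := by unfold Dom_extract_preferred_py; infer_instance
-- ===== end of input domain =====

-- B replaces A's nested overwrite loop with a one-pass first-occurrence index of the pairs
-- plus a reversed early-exit walk of the preference order; objective: faster (asymptotic).
-- Equivalence is about the RETURN value only: both Pythons also delete the chosen pair from
-- title_source_pairs in place (identically on Pre_); that mutation is not modelled here.

-- ===== PORT A =====
-- A's inner 'for i, tup in enumerate(...): source, title = tup; if pref == source: ...; break'
def pvScanA (pref : String) (i : Int) : List (String × String) → Option (Int × String)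
  | [] => none
  | (source, title) :: rest =>
      if pref == source then some (i, title) else pvScanA pref (i + 1) rest

def extract_preferred_py (title_source_pairs : List (String × String)) (preference_order : List String) : String :=
  -- state = (selected, idx); idx only feeds the in-place del, which is not modelled
  let st := preference_order.foldl
    (fun (st : Option String × Int) pref =>
      match pvScanA pref 0 title_source_pairs with
      | some (i, title) => (some title, i)
      | none => st) (none, -1)
  match st.1 with
  | some t => t
  | none => ((PySem.List.pyGet? title_source_pairs 0).map Prod.fst).getD ""  -- none = IndexError, excluded by Pre_

-- ===== PORT B =====
-- 'first = {}; for i, (source, title) in enumerate(pairs): first.setdefault(source, (i, title))'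
def pvIndexB (title_source_pairs : List (String × String)) : PySem.Dict String (Int × String) :=
  (PySem.List.enumerate title_source_pairs).foldl
    (fun d e => d.setdefault e.2.1 (e.1, e.2.2)) PySem.Dict.empty

-- 'for pref in reversed(preference_order): if pref in first: idx, selected = first[pref]; break'
def pvPickB (first : PySem.Dict String (Int × String)) : List String → Option (Int × String)
  | [] => none
  | pref :: rest =>
      match first.get? pref with
      | some v => some v
      | none => pvPickB first rest

def extract_preferred_py_alt (title_source_pairs : List (String × String)) (preference_order : List String) : String :=
  let first := pvIndexB title_source_pairs
  match pvPickB first preference_order.reverse with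
  | some (_, selected) => selected
  | none => ((PySem.List.pyGet? title_source_pairs 0).map Prod.fst).getD ""  -- none = IndexError, excluded by Pre_

-- ===== PRECONDITION & SPEC =====
-- Pre_ excludes only the empty pair list: there no preference can match, and both Pythons
-- raise IndexError on 'title_source_pairs[0][0]' (and the 'del' could not succeed either).
def Pre_extract_preferred_py (title_source_pairs : List (String × String)) (_preference_order : List String) : Prop :=
  title_source_pairs ≠ []
instance (title_source_pairs : List (String × String)) (preference_order : List String) : Decidable (Pre_extract_preferred_py title_source_pairs preference_order) := by unfold Pre_extract_preferred_py; infer_instance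
def pvWitness_extract_preferred_py : (List (String × String)) × List String := ([("issn", "Journal A"), ("doaj", "Journal B")], ["doaj", "issn"])

def Spec_extract_preferred_py (title_source_pairs : List (String × String)) (preference_order : List String) (out : String) : Prop := out = extract_preferred_py_alt title_source_pairs preference_order
instance (title_source_pairs : List (String × String)) (preference_order : List String) (out : String) : Decidable (Spec_extract_preferred_py title_source_pairs preference_order out) := by unfold Spec_extract_preferred_py; infer_instance

-- ===== CLAIM (what is proved, stated in full; the proofs are below) =====
def Claim_equal_extract_preferred_py : Prop := ∀ (title_source_pairs : List (String × String)) (preference_order : List String), Dom_extract_preferred_py title_source_pairs preference_order → Pre_extract_preferred_py title_source_pairs preference_order → Spec_extract_preferred_py title_source_pairs preference_order (extract_preferred_py title_source_pairs preference_order)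

-- ===== LEMMAS AND PROOFS =====

-- title found by A's inner scan = title of the first pair whose source is pref
theorem pvScanA_map_snd (pref : String) (i : Int) (ps : List (String × String)) :
    (pvScanA pref i ps).map Prod.snd = (ps.find? (fun tup => tup.1 == pref)).map Prod.snd := by
  induction ps generalizing i with
  | nil => rfl
  | cons hd tl ih =>
      obtain ⟨s, t⟩ := hd
      by_cases h : pref = s
      · simp [pvScanA, List.find?, h]
      · have hs : (s == pref) = false := by simp; exact Ne.symm h
        simp [pvScanA, List.find?, h, hs, ih]

theorem pvScanA_isSome (pref : String) (i : Int) (ps : List (String × String)) :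
    (pvScanA pref i ps).isSome = (ps.map Prod.fst).contains pref := by
  induction ps generalizing i with
  | nil => rfl
  | cons hd tl ih =>
      obtain ⟨s, t⟩ := hd
      by_cases h : pref = s
      · simp [pvScanA, h]
      · simp [pvScanA, h, ih]

theorem pv_find_isSome (ps : List (String × String)) (p : String) :
    (ps.find? (fun tup => tup.1 == p)).isSome = (ps.map Prod.fst).contains p := by
  induction ps with
  | nil => rfl
  | cons hd tl ih =>
      by_cases h : hd.1 = p
      · simp [List.find?, h]
      · have h1 : (hd.1 == p) = false := by simp [h]
        have h2 : (p == hd.1) = false := by simp; exact fun e => h e.symm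
        simpa [List.find?, h1, h2] using ih

-- the looked-up value in B's index has, as snd, the first matching title
theorem pvIndexB_fold_get (p : String) (ps : List (String × String)) :
    ∀ (i : Int) (d : PySem.Dict String (Int × String)),
    (((PySem.List.enumerate ps i).foldl
        (fun d e => d.setdefault e.2.1 (e.1, e.2.2)) d).get? p).map Prod.snd
      = ((d.get? p).map Prod.snd).or ((ps.find? (fun tup => tup.1 == p)).map Prod.snd) := by
  induction ps with
  | nil => intro i d; simp [PySem.List.enumerate_nil]
  | cons hd tl ih =>
      intro i d
      obtain ⟨s, t⟩ := hd
      rw [PySem.List.enumerate_cons]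
      simp only [List.foldl_cons]
      rw [ih]
      by_cases hc : d.contains s = true
      · rw [PySem.Dict.setdefault_of_contains _ _ hc]
        by_cases hp : p = s
        · subst hp
          have hsome : (d.get? p).isSome = true := by
            rw [← PySem.Dict.contains_eq_isSome_get?]; exact hc
          obtain ⟨v, hv⟩ := Option.isSome_iff_exists.mp hsome
          simp [hv, List.find?]
        · have hs : (s == p) = false := by simp; exact fun h => hp h.symm
          simp [List.find?, hs]
      · rw [PySem.Dict.setdefault_of_not_contains _ _ (by simpa using hc)]
        by_cases hp : p = s
        · subst hp
          have hnone : d.get? p = none := by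
            rcases h : d.get? p with _ | v
            · rfl
            · exact absurd (by rw [PySem.Dict.contains_eq_isSome_get?, h]; rfl) hc
          simp [PySem.Dict.get?_insert_self, hnone, List.find?]
        · have hs : (s == p) = false := by simp; exact fun h => hp h.symm
          rw [PySem.Dict.get?_insert_of_ne _ _ hp]
          simp [List.find?, hs]

theorem pvIndexB_get (p : String) (ps : List (String × String)) :
    ((pvIndexB ps).get? p).map Prod.snd = (ps.find? (fun tup => tup.1 == p)).map Prod.snd := by
  have := pvIndexB_fold_get p ps 0 PySem.Dict.empty
  simpa [pvIndexB, PySem.List.enumerate] using this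

-- B's reversed early-exit walk = first element of the list whose source is present
theorem pvPickB_eq (ps : List (String × String)) (l : List String) :
    (pvPickB (pvIndexB ps) l).map Prod.snd
      = match l.find? (fun q => (ps.map Prod.fst).contains q) with
        | some q => (ps.find? (fun tup => tup.1 == q)).map Prod.snd
        | none => none := by
  induction l with
  | nil => rfl
  | cons p rest ih =>
      have hget := pvIndexB_get p ps
      by_cases hm : p ∈ List.map Prod.fst ps
      · have hc : (List.map Prod.fst ps).contains p = true := by simpa using hm
        have hsome : ((pvIndexB ps).get? p).isSome = true := by
          have : (((pvIndexB ps).get? p).map Prod.snd).isSome = true := by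
            rw [hget, Option.isSome_map, pv_find_isSome]; exact hc
          simpa using this
        obtain ⟨v, hv⟩ := Option.isSome_iff_exists.mp hsome
        rw [hv] at hget
        simp only [Option.map_some] at hget
        simp [pvPickB, hv, List.find?, hm, hget]
      · have hc : ¬ (List.map Prod.fst ps).contains p = true := by simpa using hm
        have hnone : (pvIndexB ps).get? p = none := by
          rcases h : (pvIndexB ps).get? p with _ | v
          · rfl
          · rw [h] at hget
            have hs : (ps.find? (fun tup => tup.1 == p)).isSome = true := by
              have := congrArg Option.isSome hget
              simpa using this.symm
            rw [pv_find_isSome] at hs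
            exact absurd hs hc
        simp only [pvPickB, hnone]
        rw [ih]
        simp [List.find?, hm]

-- A's last-preference-wins fold = first hit on the REVERSED preference order
theorem pvFoldA_eq (ps : List (String × String)) (prefs : List String) :
    ∀ (st : Option String × Int),
    (prefs.foldl
        (fun (st : Option String × Int) pref =>
          match pvScanA pref 0 ps with
          | some (i, title) => (some title, i)
          | none => st) st).1
      = match prefs.reverse.find? (fun q => (ps.map Prod.fst).contains q) with
        | some q => (ps.find? (fun tup => tup.1 == q)).map Prod.snd
        | none => st.1 := by
  induction prefs with
  | nil => intro st; rfl
  | cons p rest ih =>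
      intro st
      simp only [List.foldl_cons, List.reverse_cons, List.find?_append]
      rw [ih]
      by_cases hm : p ∈ List.map Prod.fst ps
      · have hc : (List.map Prod.fst ps).contains p = true := by simpa using hm
        cases hr : rest.reverse.find? (fun q => (ps.map Prod.fst).contains q) with
        | some q => simp
        | none =>
            have hsome : (pvScanA p 0 ps).isSome = true := by
              rw [pvScanA_isSome]; exact hc
            obtain ⟨⟨i, t⟩, hscan⟩ := Option.isSome_iff_exists.mp hsome
            have hsnd := pvScanA_map_snd p 0 ps
            rw [hscan] at hsnd
            simp only [Option.map_some] at hsnd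
            simp [hscan, List.find?, hm, hsnd]
      · have hc : ¬ (List.map Prod.fst ps).contains p = true := by simpa using hm
        have hnone : pvScanA p 0 ps = none := by
          rcases h : pvScanA p 0 ps with _ | v
          · rfl
          · have hs : (pvScanA p 0 ps).isSome = true := by rw [h]; rfl
            rw [pvScanA_isSome] at hs
            exact absurd hs hc
        cases hr : rest.reverse.find? (fun q => (ps.map Prod.fst).contains q) with
        | some q => simp
        | none => simp [hnone, List.find?, hm]

-- ===== VERDICT (by name: the statement is the Claim_ definition above) =====
theorem extract_preferred_py_spec : Claim_equal_extract_preferred_py := by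
  intro ps prefs _hdom _hpre
  show extract_preferred_py ps prefs = extract_preferred_py_alt ps prefs
  simp only [extract_preferred_py, extract_preferred_py_alt]
  have hA := pvFoldA_eq ps prefs (none, -1)
  have hB := pvPickB_eq ps prefs.reverse
  cases hr : prefs.reverse.find? (fun q => (ps.map Prod.fst).contains q) with
  | none =>
      rw [hr] at hA hB
      have hBnone : pvPickB (pvIndexB ps) prefs.reverse = none := by
        rcases h : pvPickB (pvIndexB ps) prefs.reverse with _ | v
        · rfl
        · rw [h] at hB; simp at hB
      simp [hA, hBnone]
  | some q =>
      rw [hr] at hA hB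
      simp only [] at hA hB
      have hcq : (ps.map Prod.fst).contains q = true := by
        have := List.find?_some hr; simpa using this
      have hfs : (ps.find? (fun tup => tup.1 == q)).isSome = true := by
        rw [pv_find_isSome]; exact hcq
      obtain ⟨tup, htup⟩ := Option.isSome_iff_exists.mp hfs
      rw [htup] at hA hB
      have hBsome : ∃ v, pvPickB (pvIndexB ps) prefs.reverse = some v ∧ v.2 = tup.2 := by
        rcases h : pvPickB (pvIndexB ps) prefs.reverse with _ | v
        · rw [h] at hB; simp at hB
        · rw [h] at hB; simp at hB; exact ⟨v, rfl, hB⟩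
      obtain ⟨v, hv, hv2⟩ := hBsome
      simp [hA, hv, ← hv2]
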